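-- pv_equiv track=rewrite | github.com/AMC-IITBHU/Assignments-2021 | Week1/work.py | even_sort
-- ===== SOURCE A (Python) =====
-- def even_sort(arr):
--     '''
--     This function sorts the array giving higher preference to even numbers
--     args:
--         arr (list)
--     returns:
--         sort_arr (list)
--     ex:
--         arr = [15, 2, 6, 88, 7]
--         ## then
--         sort_arr = [2, 6, 88 ,7 ,15]
--         ## This is any even number is smaller than any odd number
--     '''
--
--     ## Code Here
--     arr.sort()
--     even_numbers_list = []
--     for number in arr:
--         if number % 2 == 0:
--             even_numbers_list.append(number)
--     odd_numbers_list = []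
--     for number in arr:
--         if not number % 2 == 0:
--             odd_numbers_list.append(number)
--
--     final_list = even_numbers_list + odd_numbers_list
--
--     return final_list
-- ===== SOURCE B (Python) =====
-- def even_sort(arr):
--     arr.sort()
--     return sorted(arr, key=lambda x: x % 2)
-- ===== Notes on version B (the rewrite author's own statement) =====
-- stated objective: simpler
-- what changed: Replaces A's two explicit filter passes over the sorted list with a single stable keyed sort by parity (evens key 0 before odds key 1, ascending order preserved by stability).
import Mathlib
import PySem

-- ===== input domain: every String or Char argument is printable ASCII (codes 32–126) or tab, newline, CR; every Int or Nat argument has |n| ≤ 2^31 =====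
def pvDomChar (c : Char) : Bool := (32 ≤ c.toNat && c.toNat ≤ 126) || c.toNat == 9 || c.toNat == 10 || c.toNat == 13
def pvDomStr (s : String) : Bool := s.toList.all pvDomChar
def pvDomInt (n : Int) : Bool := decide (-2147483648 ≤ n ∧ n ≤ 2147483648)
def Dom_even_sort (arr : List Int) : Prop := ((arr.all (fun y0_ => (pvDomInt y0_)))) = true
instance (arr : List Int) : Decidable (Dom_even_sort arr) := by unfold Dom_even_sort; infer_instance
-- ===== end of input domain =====

-- B replaces A's two filter passes with one stable keyed sort by parity; both Pythons sort
-- the argument in place (the equivalence proved here is about the RETURN value).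

-- ===== PORT A =====
def even_sort (arr : List Int) : List Int :=
  let arrS := PySem.List.sorted arr (fun x => x) false
  let even_numbers_list :=
    arrS.foldl (fun acc number =>
      if PySem.Int.mod number 2 == 0 then acc ++ [number] else acc) []
  let odd_numbers_list :=
    arrS.foldl (fun acc number =>
      if !(PySem.Int.mod number 2 == 0) then acc ++ [number] else acc) []
  even_numbers_list ++ odd_numbers_list

-- ===== PORT B =====
def even_sort_alt (arr : List Int) : List Int :=
  let arrS := PySem.List.sorted arr (fun x => x) false
  PySem.List.sorted arrS (fun x => PySem.Int.mod x 2) false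

-- ===== PRECONDITION & SPEC =====
def Spec_even_sort (arr : List Int) (out : List Int) : Prop := out = even_sort_alt arr
instance (arr : List Int) (out : List Int) : Decidable (Spec_even_sort arr out) := by unfold Spec_even_sort; infer_instance

-- ===== CLAIM (what is proved, stated in full; the proofs are below) =====
def Claim_equal_even_sort : Prop := ∀ (arr : List Int), Dom_even_sort arr → Spec_even_sort arr (even_sort arr)

-- ===== LEMMAS AND PROOFS =====

lemma pv_insertBy_mid (p : Int → Int → Bool) (x : Int) (e o : List Int)
    (he : ∀ y ∈ e, p x y = false) (ho : ∀ y ∈ o, p x y = true) :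
    PySem.List.insertBy p x (e ++ o) = e ++ x :: o := by
  induction e with
  | nil =>
    cases o with
    | nil => rfl
    | cons a o' =>
      have : p x a = true := ho a (by simp)
      show PySem.List.insertBy p x (a :: o') = x :: a :: o'
      rw [show PySem.List.insertBy p x (a :: o') =
        if p x a then x :: a :: o' else a :: PySem.List.insertBy p x o' from rfl, this]
      simp
  | cons b e' ih =>
    have hb : p x b = false := he b (by simp)
    show PySem.List.insertBy p x (b :: (e' ++ o)) = b :: (e' ++ x :: o)
    rw [show PySem.List.insertBy p x (b :: (e' ++ o)) =
      if p x b then x :: b :: (e' ++ o) else b :: PySem.List.insertBy p x (e' ++ o) from rfl, hb]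
    simp [ih (fun y hy => he y (by simp [hy]))]

lemma pv_mod_two_cases (x : Int) : PySem.Int.mod x 2 = 0 ∨ PySem.Int.mod x 2 = 1 := by
  have h1 := PySem.Int.mod_nonneg x (b := 2) (by norm_num)
  have h2 := PySem.Int.mod_lt x (b := 2) (by norm_num)
  omega

-- the key invariant: the insertion-sort fold by parity key partitions, keeping order
lemma pv_fold_partition (s e o : List Int)
    (he : ∀ y ∈ e, PySem.Int.mod y 2 = 0) (ho : ∀ y ∈ o, PySem.Int.mod y 2 = 1) :
    s.foldl (fun acc x =>
        PySem.List.insertBy (fun a b => decide (PySem.Int.mod a 2 < PySem.Int.mod b 2)) x acc)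
      (e ++ o)
    = (e ++ s.filter (fun x => PySem.Int.mod x 2 == 0))
      ++ (o ++ s.filter (fun x => !(PySem.Int.mod x 2 == 0))) := by
  induction s generalizing e o with
  | nil => simp
  | cons x s ih =>
    rcases pv_mod_two_cases x with hx | hx
    · rw [List.foldl_cons,
        pv_insertBy_mid _ x e o
          (fun y hy => by rw [show PySem.Int.mod y 2 = 0 from he y hy, hx]; decide)
          (fun y hy => by rw [show PySem.Int.mod y 2 = 1 from ho y hy, hx]; decide),
        show e ++ x :: o = (e ++ [x]) ++ o by simp,
        ih (e ++ [x]) o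
          (fun y hy => by rcases List.mem_append.mp hy with h | h; exact he y h; simp_all)
          ho]
      simp only [List.filter_cons, hx]
      simp
    · rw [List.foldl_cons,
        PySem.List.insertBy_of_forall_not_before _ x (e ++ o)
          (fun y hy => by
            rcases List.mem_append.mp hy with h | h
            · rw [show PySem.Int.mod y 2 = 0 from he y h, hx]; decide
            · rw [show PySem.Int.mod y 2 = 1 from ho y h, hx]; decide),
        show (e ++ o) ++ [x] = e ++ (o ++ [x]) by simp,
        ih e (o ++ [x]) he
          (fun y hy => by rcases List.mem_append.mp hy with h | h; exact ho y h; simp_all)]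
      simp only [List.filter_cons, hx]
      simp

-- ===== VERDICT (by name: the statement is the Claim_ definition above) =====
theorem even_sort_spec : Claim_equal_even_sort := by
  intro arr _
  show even_sort arr = even_sort_alt arr
  unfold even_sort even_sort_alt
  set s := PySem.List.sorted arr (fun x => x) false with hs
  show _ ++ _ = PySem.List.sorted s (fun x => PySem.Int.mod x 2) false
  rw [PySem.List.sorted_eq_foldl_insertBy]
  have hpart := pv_fold_partition s [] [] (by simp) (by simp)
  simp only [List.nil_append] at hpart
  rw [hpart, PySem.List.foldl_append_if_eq_filter, PySem.List.foldl_append_if_eq_filter]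
  simp
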